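-- pv_equiv track=rewrite | github.com/takapdayon/atcoder | python/_abc/AtCoderBeginnerContest058/C.py | mozi
-- ===== SOURCE A (Python) =====
-- def mozi(n , s):
--     ans = ""
--     for code in range(ord('a'), ord('z') + 1):
--         azmin = 50
--         for i in range(n):
--             azmin = min(azmin , str(s[i]).count(chr(code)))
--
--         if azmin != 0:
--             for i in range(azmin):
--                 ans += chr(code)
--
--     return ans
-- ===== SOURCE B (Python) =====
-- def mozi(n, s):
--     letters = [chr(c) for c in range(97, 123)]
--     mins = [50] * 26
--     for x in s[:max(n, 0)]:
--         cnt = {}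
--         for ch in str(x):
--             cnt[ch] = cnt.get(ch, 0) + 1
--         mins = [min(m, cnt.get(ch, 0)) for m, ch in zip(mins, letters)]
--     return "".join(ch * m for ch, m in zip(letters, mins))
-- ===== Notes on version B (the rewrite author's own statement) =====
-- stated objective: alternative
-- what changed: A makes 26 per-letter passes, each rescanning every string with str.count and appending characters one by one; B makes a single fold over the strings, counting each string once into a dict and maintaining a 26-vector of per-letter minima, then joins the result.
import Mathlib
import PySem

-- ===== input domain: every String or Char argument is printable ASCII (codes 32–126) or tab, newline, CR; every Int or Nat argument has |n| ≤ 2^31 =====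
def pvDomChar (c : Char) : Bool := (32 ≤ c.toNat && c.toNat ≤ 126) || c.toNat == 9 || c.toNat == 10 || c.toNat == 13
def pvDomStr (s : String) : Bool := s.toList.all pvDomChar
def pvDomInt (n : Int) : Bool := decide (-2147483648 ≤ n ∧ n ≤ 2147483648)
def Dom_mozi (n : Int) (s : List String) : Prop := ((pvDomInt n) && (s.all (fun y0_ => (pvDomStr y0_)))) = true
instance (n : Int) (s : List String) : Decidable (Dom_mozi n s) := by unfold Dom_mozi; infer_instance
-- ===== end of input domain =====

-- B replaces A's 26 per-letter passes (each rescanning every string with str.count) by one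
-- fold over the strings that counts each string once and maintains a vector of per-letter
-- minima (objective: alternative traversal, same asymptotic cost).

-- ===== PORT A =====
def mozi (n : Int) (s : List String) : String :=
  (PySem.List.pyRange 97 123).foldl (fun ans code =>
    let azmin : Int := (PySem.List.pyRange 0 n).foldl
      (fun azmin i =>
        min azmin ((PySem.Str.count (PySem.List.pyGetD s i "") (String.ofList [Char.ofNat code.toNat]) : Nat) : Int))
      50
    if azmin ≠ 0 then
      (PySem.List.pyRange 0 azmin).foldl (fun ans _ => ans ++ String.ofList [Char.ofNat code.toNat]) ans
    else ans) ""

-- ===== PORT B =====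
-- letters = [chr(c) for c in range(97, 123)]
def moziLetters : List Char := (PySem.List.pyRange 97 123).map (fun c => Char.ofNat c.toNat)

-- the per-string counting dict: cnt = {}; for ch in str(x): cnt[ch] = cnt.get(ch, 0) + 1
def moziCnt (x : String) : PySem.Dict Char Int :=
  x.toList.foldl (fun d ch => d.insert ch (d.getD ch 0 + 1)) PySem.Dict.empty

def mozi_alt (n : Int) (s : List String) : String :=
  let mins0 : List Int := PySem.List.pyRepeat [(50 : Int)] 26
  let mins := (PySem.List.slice s none (some (max n 0))).foldl
    (fun mins x =>
      let cnt := moziCnt x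
      (mins.zip moziLetters).map (fun p => min p.1 (cnt.getD p.2 0)))
    mins0
  PySem.Str.join "" ((moziLetters.zip mins).map (fun p => String.ofList (PySem.List.pyRepeat [p.1] p.2)))

-- ===== PRECONDITION & SPEC =====
-- Pre_ excludes exactly the inputs on which A raises: for n > len(s) the access s[i] raises IndexError.
def Pre_mozi (n : Int) (s : List String) : Prop := n ≤ (s.length : Int)
instance (n : Int) (s : List String) : Decidable (Pre_mozi n s) := by unfold Pre_mozi; infer_instance
def pvWitness_mozi : Int × List String := (2, ["abca", "bab"])

def Spec_mozi (n : Int) (s : List String) (out : String) : Prop := out = mozi_alt n s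
instance (n : Int) (s : List String) (out : String) : Decidable (Spec_mozi n s out) := by unfold Spec_mozi; infer_instance

-- ===== CLAIM (what is proved, stated in full; the proofs are below) =====
def Claim_equal_mozi : Prop := ∀ (n : Int) (s : List String), Dom_mozi n s → Pre_mozi n s → Spec_mozi n s (mozi n s)

-- ===== LEMMAS AND PROOFS =====

-- the per-letter minimum over a list of strings, the common value both ports compute
def moziMin (xs : List String) (c : Char) : Int :=
  xs.foldl (fun m x => min m ((x.toList.count c : Nat) : Int)) 50

-- Python str.count with a single-character needle is List.count
theorem moziCount_go_singleton (c : Char) : ∀ (l : List Char) (fuel acc : Nat), l.length ≤ fuel →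
    PySem.Chars.count.go [c] fuel l acc = acc + l.count c := by
  intro l
  induction l with
  | nil => intro fuel acc _; cases fuel <;> simp [PySem.Chars.count.go]
  | cons h t ih =>
    intro fuel acc hle
    cases fuel with
    | zero => simp at hle
    | succ m =>
      rw [PySem.Chars.count.go]
      by_cases hc : c = h
      · subst hc
        simp only [List.isPrefixOf, BEq.rfl, Bool.true_and, if_true,
          List.length_singleton, List.drop_one, List.tail_cons,
          ih m (acc + 1) (by simpa using hle), List.count_cons_self]
        omega
      · simp [List.isPrefixOf, hc, ih m acc (by simpa using hle), Ne.symm hc]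

theorem moziCount_singleton (c : Char) (l : List Char) : PySem.Chars.count l [c] = l.count c := by
  rw [PySem.Chars.count]
  simp [moziCount_go_singleton c l l.length 0 le_rfl]

-- A's inner index loop over range(n) is the fold of min over the first n strings
theorem mozi_inner (n : Int) (s : List String) (c : Char) (h1 : n ≤ (s.length : Int)) :
    (PySem.List.pyRange 0 n).foldl
      (fun azmin i => min azmin ((PySem.Str.count (PySem.List.pyGetD s i "") (String.ofList [c]) : Nat) : Int)) 50
    = moziMin (s.take n.toNat) c := by
  by_cases h0 : 0 ≤ n
  case neg =>
    rw [PySem.List.pyRange_one_eq_nil (by omega)]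
    have : n.toNat = 0 := by omega
    simp [this, moziMin]
  have hlen : ((s.take n.toNat).length : Int) = n := by
    simp [List.length_take]; omega
  have hcong : ∀ (acc : Int), ∀ i ∈ PySem.List.pyRange 0 n,
      min acc ((PySem.Str.count (PySem.List.pyGetD s i "") (String.ofList [c]) : Nat) : Int)
      = min acc ((PySem.Str.count (PySem.List.pyGetD (s.take n.toNat) i "") (String.ofList [c]) : Nat) : Int) := by
    intro acc i hi
    rw [PySem.List.mem_pyRange_one] at hi
    rw [PySem.List.pyGetD_eq_getElem s "" hi.1 (by omega),
        PySem.List.pyGetD_eq_getElem (s.take n.toNat) "" hi.1 (by omega)]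
    congr 2
    rw [List.getElem_take]
  rw [PySem.List.foldl_congr_mem _ _ _ _ hcong]
  have := PySem.List.foldl_pyRange_zero_pyGetD' (s.take n.toNat) ""
    (fun (m : Int) (x : String) => min m ((PySem.Str.count x (String.ofList [c]) : Nat) : Int)) 50
  rw [hlen] at this
  rw [this]
  unfold moziMin
  apply PySem.List.foldl_congr_mem
  intro acc x _
  rw [PySem.Str.count_eq]
  simp [moziCount_singleton]

-- A's character-append loop builds a replicate
theorem mozi_append_loop (c : Char) : ∀ (k : Nat) (ans : String),
    (List.range k).foldl (fun a _ => a ++ String.ofList [c]) ans = ans ++ String.ofList (List.replicate k c) := by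
  intro k
  induction k with
  | zero => intro ans; apply String.toList_inj.mp; simp
  | succ m ih =>
    intro ans
    rw [List.range_succ, List.foldl_append, ih]
    apply String.toList_inj.mp
    simp [List.replicate_succ']

-- one iteration of A's outer letter loop (the `if azmin != 0` guard is a no-op)
theorem mozi_letter_step (n : Int) (s : List String) (code : Int) (ans : String)
    (h1 : n ≤ (s.length : Int)) :
    (let azmin : Int := (PySem.List.pyRange 0 n).foldl
      (fun azmin i =>
        min azmin ((PySem.Str.count (PySem.List.pyGetD s i "") (String.ofList [Char.ofNat code.toNat]) : Nat) : Int)) 50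
     if azmin ≠ 0 then
      (PySem.List.pyRange 0 azmin).foldl (fun ans _ => ans ++ String.ofList [Char.ofNat code.toNat]) ans
     else ans)
    = ans ++ String.ofList (List.replicate (moziMin (s.take n.toNat) (Char.ofNat code.toNat)).toNat (Char.ofNat code.toNat)) := by
  simp only [mozi_inner n s (Char.ofNat code.toNat) h1]
  set c := Char.ofNat code.toNat
  set m := moziMin (s.take n.toNat) c with hm
  by_cases hz : m = 0
  · simp only [hz, ne_eq, not_true_eq_false, if_false]
    apply String.toList_inj.mp
    simp
  · simp only [ne_eq, hz, not_false_eq_true, if_true]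
    rw [PySem.List.pyRange_one, List.foldl_map, mozi_append_loop]
    simp

theorem mozi_foldl_toList {α : Type} (f : α → List Char) : ∀ (l : List α) (init : String),
    (l.foldl (fun a x => a ++ String.ofList (f x)) init).toList = init.toList ++ (l.map f).flatten := by
  intro l
  induction l with
  | nil => simp
  | cons h t ih => intro init; simp [ih, List.append_assoc]

theorem mozi_chars_join_nil_sep : ∀ (l : List (List Char)), PySem.Chars.join [] l = l.flatten := by
  intro l
  induction l with
  | nil => simp [PySem.Chars.join_nil]
  | cons p rest ih =>
    cases rest with
    | nil => simp [PySem.Chars.join_singleton]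
    | cons q r => rw [PySem.Chars.join_cons_cons]; simp_all

theorem mozi_join_empty_toList (parts : List String) :
    (PySem.Str.join "" parts).toList = (parts.map String.toList).flatten := by
  rw [PySem.Str.toList_join]
  have h : ("" : String).toList = [] := by decide
  rw [h, mozi_chars_join_nil_sep]

-- B's per-string counting dict reads back as List.count
theorem moziCnt_getD (x : String) (ch : Char) : (moziCnt x).getD ch 0 = ((x.toList.count ch : Nat) : Int) := by
  unfold moziCnt
  rw [PySem.Dict.getD_foldl_insert_add_one]
  simp

theorem mozi_zip_map_min (h : Char → Int) : ∀ (letters : List Char) (m0 : Char → Int),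
    ((letters.map m0).zip letters).map (fun p => min p.1 (h p.2)) = letters.map (fun ch => min (m0 ch) (h ch)) := by
  intro letters
  induction letters with
  | nil => intro m0; simp
  | cons a t ih => intro m0; simp [ih]

-- B's fold over the strings keeps mins = a map over the letters
theorem mozi_mins_invariant : ∀ (xs : List String) (m0 : Char → Int),
    xs.foldl (fun mins x => ((mins.zip moziLetters).map (fun p => min p.1 ((moziCnt x).getD p.2 0)))) (moziLetters.map m0)
    = moziLetters.map (fun ch => xs.foldl (fun m x => min m ((moziCnt x).getD ch 0)) (m0 ch)) := by
  intro xs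
  induction xs with
  | nil => intro m0; simp
  | cons x t ih =>
    intro m0
    rw [List.foldl_cons, mozi_zip_map_min (fun ch => (moziCnt x).getD ch 0) moziLetters m0,
        ih (fun ch => min (m0 ch) ((moziCnt x).getD ch 0))]
    simp

theorem mozi_zip_map_out {β : Type} (F : Char → Int → β) (g : Char → Int) : ∀ (letters : List Char),
    ((letters.zip (letters.map g)).map (fun p => F p.1 p.2)) = letters.map (fun ch => F ch (g ch)) := by
  intro letters
  induction letters with
  | nil => simp
  | cons a t ih => simp [ih]

theorem mozi_mins0 : PySem.List.pyRepeat [(50 : Int)] 26 = moziLetters.map (fun _ => 50) := by decide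

theorem mozi_cnt_fold (xs : List String) (ch : Char) :
    xs.foldl (fun m x => min m ((moziCnt x).getD ch 0)) 50 = moziMin xs ch := by
  unfold moziMin
  apply PySem.List.foldl_congr_mem
  intro acc x _
  rw [moziCnt_getD]

-- ===== VERDICT (by name: the statement is the Claim_ definition above) =====
theorem mozi_spec : Claim_equal_mozi := by
  intro n s _ h1
  unfold Pre_mozi at h1
  unfold Spec_mozi mozi mozi_alt
  have hmax : (max n 0).toNat = n.toNat := by omega
  have hslice : PySem.List.slice s none (some (max n 0)) = s.take n.toNat := by
    rw [PySem.List.slice_to s (by omega : (0:Int) ≤ max n 0), hmax]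
  rw [PySem.List.foldl_congr_mem (PySem.List.pyRange 97 123) _
      (fun ans code => ans ++ String.ofList
        (List.replicate (moziMin (s.take n.toNat) (Char.ofNat code.toNat)).toNat (Char.ofNat code.toNat))) ""
      (fun ans code _ => mozi_letter_step n s code ans h1)]
  simp only [hslice, mozi_mins0, mozi_mins_invariant, mozi_cnt_fold,
    mozi_zip_map_out (fun ch m => String.ofList (PySem.List.pyRepeat [ch] m)) (moziMin (s.take n.toNat))]
  apply String.toList_inj.mp
  have hA := mozi_foldl_toList (fun code =>
        List.replicate (moziMin (s.take n.toNat) (Char.ofNat code.toNat)).toNat (Char.ofNat code.toNat))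
      (PySem.List.pyRange 97 123) ""
  rw [hA, mozi_join_empty_toList]
  simp only [moziLetters, List.map_map, String.toList_empty, List.nil_append]
  apply congrArg List.flatten
  apply List.map_congr_left
  intro c _
  simp [PySem.List.pyRepeat_singleton]
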